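-- pv_equiv track=rewrite | github.com/FelineJTD/Mastermind-Solver | greedy.py | minimal_eliminated
-- ===== SOURCE A (Python) =====
-- def score(actual, guess):
--     """Calculate score of guess against actual."""
--     result = []
--     #Black pin for every color at right position
--     actual_list = list(actual)
--     guess_list = list(guess)
--     black_positions = [number for number, pair in enumerate(zip(actual_list, guess_list)) if pair[0] == pair[1]]
--     for number in reversed(black_positions):
--         del actual_list[number]
--         del guess_list[number]
--         result.append('black')
--     #White pin for every color at wrong position
--     for color in guess_list:
--         if color in actual_list:
--             #Remove the match so we can't score it again for duplicate colors
--             actual_list.remove(color)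
--             result.append('white')
--     #Return a tuple, which is suitable as a dictionary key
--     return tuple(result)
--
-- def minimal_eliminated(solution_space, solution):
--     """For solution calculate how many possibilities from S would be eliminated for each possible colored/white score.
--     The score of the guess is the least of such values."""
--     result_counter = {}
--     for option in solution_space:
--         result = score(solution, option)
--         if result not in result_counter.keys():
--             result_counter[result] = 1
--         else:
--             result_counter[result] += 1
--     return len(solution_space) - max(result_counter.values())
-- ===== SOURCE B (Python) =====
-- def minimal_eliminated(solution_space, solution):
--     """For solution calculate how many possibilities from S would be eliminated for each possible colored/white score.
--     The score of the guess is the least of such values."""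
--     def counts(xs):
--         d = {}
--         for x in xs:
--             d[x] = d.get(x, 0) + 1
--         return d
--
--     ca = counts(solution)
--
--     def score_key(guess):
--         # blacks = exact positional matches; whites = multiset overlap minus blacks.
--         blacks = sum(a == g for a, g in zip(solution, guess))
--         cg = counts(guess)
--         total = sum(min(n, cg.get(c, 0)) for c, n in ca.items())
--         return (blacks, total - blacks)
--
--     tally = counts(score_key(option) for option in solution_space)
--     return len(solution_space) - max(tally.values())
-- ===== Notes on version B (the rewrite author's own statement) =====
-- stated objective: faster
-- what changed: score's black-position deletion loop and per-color list.remove scans are replaced by frequency counting (blacks = positional matches over the zip, whites = sum over colors of min(count in actual, count in guess) minus blacks), and the tally dict is keyed by the (blacks, whites) pair instead of the string tuple.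
import Mathlib
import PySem

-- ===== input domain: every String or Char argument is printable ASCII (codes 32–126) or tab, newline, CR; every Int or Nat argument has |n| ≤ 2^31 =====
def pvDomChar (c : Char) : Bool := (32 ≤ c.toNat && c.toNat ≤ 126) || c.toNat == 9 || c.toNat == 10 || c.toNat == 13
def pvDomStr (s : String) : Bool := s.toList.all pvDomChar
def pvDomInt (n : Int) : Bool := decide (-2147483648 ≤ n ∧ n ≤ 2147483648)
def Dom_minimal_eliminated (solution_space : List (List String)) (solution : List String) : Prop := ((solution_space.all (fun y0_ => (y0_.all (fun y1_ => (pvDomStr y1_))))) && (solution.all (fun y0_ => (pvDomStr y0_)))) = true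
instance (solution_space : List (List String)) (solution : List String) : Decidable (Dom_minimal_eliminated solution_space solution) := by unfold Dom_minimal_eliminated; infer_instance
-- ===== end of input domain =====

-- B replaces score's list-deletion and repeated remove() scans by frequency counting
-- (blacks = positional matches, whites = multiset overlap minus blacks) and keys the
-- tally by the (blacks, whites) pair; equivalence is proved on the return value.

-- ===== PORT A =====
-- step of A's `for number in reversed(black_positions): del actual_list[number]; del guess_list[number]; result.append('black')`
-- (the indices come from enumerate, hence are nonnegative and in range, so eraseIdx n.toNat is exactly Python's del)
def pvA_delStep (st : List String × List String × List String) (n : Int) :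
    List String × List String × List String :=
  (st.1.eraseIdx n.toNat, st.2.1.eraseIdx n.toNat, st.2.2 ++ ["black"])

-- step of A's white loop: `if color in actual_list: actual_list.remove(color); result.append('white')`
def pvA_whiteStep (st : List String × List String) (color : String) : List String × List String :=
  if st.1.contains color then
    ((PySem.List.remove? st.1 color).getD st.1, st.2 ++ ["white"])
  else st

def pvA_score (actual guess : List String) : List String :=
  let actual_list := actual
  let guess_list := guess
  let black_positions :=
    ((PySem.List.enumerate (actual_list.zip guess_list) 0).filter
      (fun p => p.2.1 == p.2.2)).map (fun p => p.1)
  let st := black_positions.reverse.foldl pvA_delStep (actual_list, guess_list, ([] : List String))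
  let st2 := st.2.1.foldl pvA_whiteStep (st.1, st.2.2)
  st2.2

def minimal_eliminated (solution_space : List (List String)) (solution : List String) : Int :=
  let result_counter := solution_space.foldl
    (fun (d : PySem.Dict (List String) Int) option =>
      let result := pvA_score solution option
      if !(d.keys.contains result) then d.insert result 1
      else d.insert result (d.getD result 0 + 1))
    PySem.Dict.empty
  match PySem.List.max? result_counter.values (fun x => x) with
  | some m => PySem.List.len solution_space - m
  | none => 0   -- unreachable: Python max raises on an empty solution_space (excluded by Pre_)

-- ===== PORT B =====
-- B's `counts` dict helper (d[x] = d.get(x, 0) + 1)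
def pvB_counts {α : Type} [BEq α] (xs : List α) : PySem.Dict α Int :=
  xs.foldl (fun d x => d.insert x (d.getD x 0 + 1)) PySem.Dict.empty

-- B's `score_key` closure (solution and ca are its captured variables)
def pvB_score_key (solution : List String) (ca : PySem.Dict String Int) (guess : List String) :
    Int × Int :=
  let blacks : Int := ((solution.zip guess).map (fun p => if p.1 == p.2 then (1:Int) else 0)).sum
  let cg := pvB_counts guess
  let total : Int := (ca.items.map (fun p => min p.2 (cg.getD p.1 0))).sum
  (blacks, total - blacks)

def minimal_eliminated_alt (solution_space : List (List String)) (solution : List String) : Int :=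
  let ca := pvB_counts solution
  let tally := pvB_counts (solution_space.map (pvB_score_key solution ca))
  match PySem.List.max? tally.values (fun x => x) with
  | some m => PySem.List.len solution_space - m
  | none => 0   -- unreachable: Python max raises on an empty solution_space (excluded by Pre_)

-- ===== PRECONDITION & SPEC =====
-- Pre_ excludes only the empty solution_space, on which both Pythons raise ValueError (max() of an empty sequence).
def Pre_minimal_eliminated (solution_space : List (List String)) (solution : List String) : Prop :=
  solution_space ≠ []
instance (solution_space : List (List String)) (solution : List String) :
    Decidable (Pre_minimal_eliminated solution_space solution) := by
  unfold Pre_minimal_eliminated; infer_instance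

def pvWitness_minimal_eliminated : List (List String) × List String :=
  ([["a", "b"], ["b", "a"]], ["a", "b"])

def Spec_minimal_eliminated (solution_space : List (List String)) (solution : List String) (out : Int) : Prop := out = minimal_eliminated_alt solution_space solution
instance (solution_space : List (List String)) (solution : List String) (out : Int) : Decidable (Spec_minimal_eliminated solution_space solution out) := by unfold Spec_minimal_eliminated; infer_instance

-- ===== CLAIM (what is proved, stated in full; the proofs are below) =====
def Claim_equal_minimal_eliminated : Prop := ∀ (solution_space : List (List String)) (solution : List String), Dom_minimal_eliminated solution_space solution → Pre_minimal_eliminated solution_space solution → Spec_minimal_eliminated solution_space solution (minimal_eliminated solution_space solution)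

-- ===== LEMMAS AND PROOFS =====

-- LEMMAS AND PROOFS helpers: characterisations of A's loops
-- the actual_list after A's deletion loop: unmatched positions of the zipped prefix, plus actual's tail
def pvUnA : List String → List String → List String
  | a, [] => a
  | [], _ => []
  | x :: a, y :: g => if x == y then pvUnA a g else x :: pvUnA a g

-- the guess_list after A's deletion loop
def pvUnG : List String → List String → List String
  | _, [] => []
  | [], g => g
  | x :: a, y :: g => if x == y then pvUnG a g else y :: pvUnG a g

-- the colors removed by the deletion loop (one per black pin)
def pvMtch (a g : List String) : List String :=
  ((a.zip g).filter (fun p => p.1 == p.2)).map (fun p => p.1)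

-- A's black_positions
def pvBp (a g : List String) : List Int :=
  ((PySem.List.enumerate (a.zip g) 0).filter (fun p => p.2.1 == p.2.2)).map (fun p => p.1)

theorem pv_enumerate_shift {α : Type} (xs : List α) (s : Int) :
    PySem.List.enumerate xs (s + 1) = (PySem.List.enumerate xs s).map (fun p => (p.1 + 1, p.2)) := by
  induction xs generalizing s with
  | nil => simp [PySem.List.enumerate_nil]
  | cons x xs ih => simp [PySem.List.enumerate_cons, ih (s+1)]

theorem pvBp_cons (x y : String) (a g : List String) :
    pvBp (x :: a) (y :: g)
      = if x == y then 0 :: (pvBp a g).map (· + 1) else (pvBp a g).map (· + 1) := by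
  unfold pvBp
  rw [List.zip_cons_cons, PySem.List.enumerate_cons, show (0:Int)+1 = 0+1 by rfl, pv_enumerate_shift]
  rw [List.filter_cons, List.filter_map]
  by_cases h : (x == y) = true
  · simp [h, Function.comp_def, List.map_map]
  · simp [h, Function.comp_def, List.map_map]

theorem pvBp_nonneg (a g : List String) : ∀ n ∈ pvBp a g, 0 ≤ n := by
  intro n hn
  unfold pvBp at hn
  simp only [List.mem_map, List.mem_filter] at hn
  obtain ⟨p, ⟨hp, _⟩, rfl⟩ := hn
  rw [PySem.List.mem_enumerate_iff] at hp
  obtain ⟨k, _, rfl⟩ := hp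
  simp

theorem pv_del_lift (l : List Int) (h : ∀ n ∈ l, 0 ≤ n) (x y : String)
    (A G r : List String) :
    List.foldl pvA_delStep (x :: A, y :: G, r) (l.map (· + 1))
      = ((x :: (List.foldl pvA_delStep (A, G, r) l).1),
         (y :: (List.foldl pvA_delStep (A, G, r) l).2.1),
         (List.foldl pvA_delStep (A, G, r) l).2.2) := by
  induction l generalizing A G r with
  | nil => simp
  | cons i l ih =>
    have hi : 0 ≤ i := h i (by simp)
    have hstep : pvA_delStep (x :: A, y :: G, r) (i + 1)
        = (x :: A.eraseIdx i.toNat, y :: G.eraseIdx i.toNat, r ++ ["black"]) := by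
      have h1 : (i + 1).toNat = i.toNat + 1 := by omega
      simp [pvA_delStep, h1]
    simp only [List.map_cons, List.foldl_cons, hstep]
    exact ih (fun n hn => h n (by simp [hn])) _ _ _

theorem pv_del_spec (a : List String) : ∀ (g r : List String),
    List.foldl pvA_delStep (a, g, r) (pvBp a g).reverse
      = (pvUnA a g, pvUnG a g, r ++ List.replicate (pvMtch a g).length "black") := by
  induction a with
  | nil =>
    intro g r
    cases g <;> simp [pvBp, pvUnA, pvUnG, pvMtch, PySem.List.enumerate_nil]
  | cons x a ih =>
    intro g r
    cases g with
    | nil => simp [pvBp, pvUnA, pvUnG, pvMtch, PySem.List.enumerate_nil]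
    | cons y g =>
      rw [pvBp_cons]
      by_cases h : (x == y) = true
      · have hx : x = y := by simpa using h
        rw [if_pos h, List.reverse_cons, ← List.map_reverse, List.foldl_append,
            pv_del_lift _ (by intro n hn; exact pvBp_nonneg a g n (by simpa using hn)),
            ih g r]
        simp only [pvA_delStep, List.eraseIdx_cons_zero, List.foldl_cons, List.foldl_nil,
          Int.toNat_zero]
        have : pvMtch (x :: a) (y :: g) = x :: pvMtch a g := by
          simp [pvMtch, List.zip_cons_cons, List.filter_cons, h]
        rw [this]
        simp [pvUnA, pvUnG, h, List.replicate_succ', List.append_assoc]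
      · rw [if_neg h, ← List.map_reverse,
            pv_del_lift _ (by intro n hn; exact pvBp_nonneg a g n (by simpa using hn)),
            ih g r]
        have : pvMtch (x :: a) (y :: g) = pvMtch a g := by
          simp [pvMtch, List.zip_cons_cons, List.filter_cons, h]
        rw [this]
        simp [pvUnA, pvUnG, h]

theorem pv_white_spec (G : List String) : ∀ (A r : List String),
    (List.foldl pvA_whiteStep (A, r) G).2
      = r ++ List.replicate (Multiset.card ((A : Multiset String) ∩ (G : Multiset String))) "white" := by
  induction G with
  | nil => intro A r; simp
  | cons h t ih =>
    intro A r
    have hct : ((h :: t : List String) : Multiset String) = h ::ₘ (t : Multiset String) := rfl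
    by_cases hm : h ∈ A
    · have hstep : pvA_whiteStep (A, r) h = (A.erase h, r ++ ["white"]) := by
        simp [pvA_whiteStep, hm, PySem.List.remove?_eq_some_erase A h hm]
      rw [List.foldl_cons, hstep, ih]
      have hcard : Multiset.card ((A : Multiset String) ∩ ((h :: t : List String) : Multiset String))
          = Multiset.card ((A.erase h : Multiset String) ∩ (t : Multiset String)) + 1 := by
        rw [Multiset.inter_comm, hct, Multiset.cons_inter_of_pos _ (by simpa using hm),
          ← Multiset.coe_erase, Multiset.inter_comm]
        simp
      rw [hcard, List.replicate_succ, List.append_assoc]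
      rfl
    · have hstep : pvA_whiteStep (A, r) h = (A, r) := by
        simp only [pvA_whiteStep]
        rw [if_neg (by simpa using hm)]
      have hcard : (A : Multiset String) ∩ ((h :: t : List String) : Multiset String)
          = (A : Multiset String) ∩ (t : Multiset String) := by
        rw [Multiset.inter_comm, hct, Multiset.cons_inter_of_neg _ (by simpa using hm),
          Multiset.inter_comm]
      rw [List.foldl_cons, hstep, ih, hcard]

theorem pv_score_eq (a g : List String) :
    pvA_score a g
      = List.replicate (pvMtch a g).length "black"
        ++ List.replicate
             (Multiset.card ((pvUnA a g : Multiset String) ∩ (pvUnG a g : Multiset String))) "white" := by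
  have h1 : ((PySem.List.enumerate (a.zip g) 0).filter (fun p => p.2.1 == p.2.2)).map
      (fun p => p.1) = pvBp a g := rfl
  unfold pvA_score
  simp only [h1, pv_del_spec, pv_white_spec]
  simp

theorem pv_decomp_a (a : List String) : ∀ g : List String,
    (a : Multiset String) = (pvMtch a g : Multiset String) + (pvUnA a g : Multiset String) := by
  induction a with
  | nil => intro g; cases g <;> simp [pvMtch, pvUnA]
  | cons x a ih =>
    intro g
    cases g with
    | nil => simp [pvMtch, pvUnA]
    | cons y g =>
      by_cases h : (x == y) = true
      · simp only [pvMtch, pvUnA, List.zip_cons_cons, List.filter_cons, h, if_pos]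
        simp only [List.map_cons]
        have := ih g
        simp only [pvMtch] at this
        rw [show ((x :: a : List String) : Multiset String) = x ::ₘ (a : Multiset String) from rfl,
          this]
        rfl
      · simp only [pvMtch, pvUnA, List.zip_cons_cons, List.filter_cons, h]
        have := ih g
        simp only [pvMtch] at this
        simp only [if_neg (by simpa using h), Bool.false_eq_true, if_false]
        rw [show ((x :: a : List String) : Multiset String) = x ::ₘ (a : Multiset String) from rfl,
          this,
          show ((x :: pvUnA a g : List String) : Multiset String)
            = x ::ₘ (pvUnA a g : Multiset String) from rfl]
        exact (Multiset.add_cons _ _ _).symm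

theorem pv_decomp_g (a : List String) : ∀ g : List String,
    (g : Multiset String) = (pvMtch a g : Multiset String) + (pvUnG a g : Multiset String) := by
  induction a with
  | nil => intro g; cases g <;> simp [pvMtch, pvUnG]
  | cons x a ih =>
    intro g
    cases g with
    | nil => simp [pvMtch, pvUnG]
    | cons y g =>
      by_cases h : (x == y) = true
      · have hxy : x = y := by simpa using h
        simp only [pvMtch, pvUnG, List.zip_cons_cons, List.filter_cons, h, if_pos]
        simp only [List.map_cons]
        have := ih g
        simp only [pvMtch] at this
        rw [show ((y :: g : List String) : Multiset String) = y ::ₘ (g : Multiset String) from rfl,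
          this, hxy]
        rfl
      · simp only [pvMtch, pvUnG, List.zip_cons_cons, List.filter_cons, h]
        have := ih g
        simp only [pvMtch] at this
        simp only [if_neg (by simpa using h), Bool.false_eq_true, if_false]
        rw [show ((y :: g : List String) : Multiset String) = y ::ₘ (g : Multiset String) from rfl,
          this,
          show ((y :: pvUnG a g : List String) : Multiset String)
            = y ::ₘ (pvUnG a g : Multiset String) from rfl]
        exact (Multiset.add_cons _ _ _).symm

theorem pv_inter_add (m s t : Multiset String) : (m + s) ∩ (m + t) = m + s ∩ t := by
  ext x
  simp [Multiset.count_inter, Multiset.count_add]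

theorem pv_inter_card (a g : List String) :
    Multiset.card ((a : Multiset String) ∩ (g : Multiset String))
      = (pvMtch a g).length
        + Multiset.card ((pvUnA a g : Multiset String) ∩ (pvUnG a g : Multiset String)) := by
  rw [pv_decomp_a a g, pv_decomp_g a g, pv_inter_add]
  simp

theorem pv_sum_min_counts (a g : List String) :
    ((PySem.List.dedup a).map (fun c => min (a.count c) (g.count c))).sum
      = Multiset.card ((a : Multiset String) ∩ (g : Multiset String)) := by
  classical
  have hsub : ((a : Multiset String) ∩ (g : Multiset String)).toFinset ⊆ a.toFinset := by
    intro x hx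
    rw [Multiset.mem_toFinset] at hx
    rw [List.mem_toFinset]
    have := Multiset.mem_of_le (Multiset.inter_le_left) hx
    simpa using this
  have h1 : Multiset.card ((a : Multiset String) ∩ (g : Multiset String))
      = ∑ x ∈ a.toFinset, min (a.count x) (g.count x) := by
    rw [← Multiset.toFinset_sum_count_eq]
    rw [Finset.sum_subset hsub]
    · apply Finset.sum_congr rfl
      intro x _
      simp [Multiset.count_inter]
    · intro x _ hx
      rw [Multiset.mem_toFinset] at hx
      exact Multiset.count_eq_zero.mpr hx
  rw [h1]
  have hnd := PySem.List.nodup_dedup (α := String) a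
  have htf : a.toFinset = (PySem.List.dedup a).toFinset := by
    ext x
    simp [List.mem_toFinset, PySem.List.mem_dedup]
  rw [htf, List.sum_toFinset _ hnd]

theorem pvB_counts_eq_counter {α : Type} [BEq α] (xs : List α) :
    pvB_counts xs = PySem.Dict.counter xs :=
  PySem.Dict.foldl_insert_getD_add_one_eq_counter xs

theorem pv_key_eq (solution guess : List String) :
    pvB_score_key solution (pvB_counts solution) guess
      = (((pvMtch solution guess).length : Int),
         (Multiset.card ((pvUnA solution guess : Multiset String)
            ∩ (pvUnG solution guess : Multiset String)) : Int)) := by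
  unfold pvB_score_key
  have hb : ((solution.zip guess).map (fun p => if p.1 == p.2 then (1:Int) else 0)).sum
      = ((pvMtch solution guess).length : Int) := by
    rw [PySem.List.sum_map_ite_one_zero]
    simp [pvMtch, List.countP_eq_length_filter]
  have ht : ((pvB_counts solution).items.map
        (fun p => min p.2 ((pvB_counts guess).getD p.1 0))).sum
      = (Multiset.card ((solution : Multiset String) ∩ (guess : Multiset String)) : Int) := by
    rw [pvB_counts_eq_counter, pvB_counts_eq_counter, PySem.Dict.items_counter]
    rw [List.map_map]
    have : ((fun p => min p.2 ((PySem.Dict.counter guess).getD p.1 0))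
          ∘ (fun k => (k, (List.count k solution : Int))))
        = fun k => ((min (List.count k solution) (List.count k guess) : Nat) : Int) := by
      funext k
      simp [PySem.Dict.getD_counter, PySem.List.count_eq]
    rw [this]
    have h2 : (PySem.Set.ofList solution).map
          (fun k => ((min (List.count k solution) (List.count k guess) : Nat) : Int))
        = ((PySem.Set.ofList solution).map
            (fun k => min (List.count k solution) (List.count k guess))).map
            (fun n : Nat => (n : Int)) := by
      rw [List.map_map]; rfl
    rw [h2, ← Nat.cast_list_sum,
      show PySem.Set.ofList solution = PySem.List.dedup solution from
        (PySem.List.dedup_eq_ofList solution).symm]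
    norm_cast
    exact pv_sum_min_counts solution guess
  simp only [hb, ht]
  rw [pv_inter_card]
  push_cast
  ring_nf

-- A's score tuple as a function of B's (blacks, whites) key
def pvEnc (p : Int × Int) : List String :=
  List.replicate p.1.toNat "black" ++ List.replicate p.2.toNat "white"

theorem pv_score_eq_enc (solution guess : List String) :
    pvA_score solution guess = pvEnc (pvB_score_key solution (pvB_counts solution) guess) := by
  rw [pv_key_eq, pv_score_eq]
  simp [pvEnc]

theorem pvEnc_inj (b1 w1 b2 w2 : Nat)
    (h : pvEnc ((b1 : Int), (w1 : Int)) = pvEnc ((b2 : Int), (w2 : Int))) :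
    b1 = b2 ∧ w1 = w2 := by
  simp only [pvEnc, Int.toNat_natCast] at h
  have hb : b1 = b2 := by
    have := congrArg (fun l => l.count "black") h
    simpa [List.count_append, List.count_replicate] using this
  have hw : w1 = w2 := by
    have := congrArg (fun l => l.count "white") h
    simpa [List.count_append, List.count_replicate] using this
  exact ⟨hb, hw⟩

theorem pv_ofList_map {α β : Type} [BEq α] [LawfulBEq α] [BEq β] [LawfulBEq β]
    (f : α → β) (xs : List α)
    (hinj : ∀ p ∈ xs, ∀ q ∈ xs, f p = f q → p = q) :
    PySem.Set.ofList (xs.map f) = (PySem.Set.ofList xs).map f := by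
  rw [PySem.Set.ofList_eq_foldl, PySem.Set.ofList_eq_foldl]
  suffices h : ∀ (acc : List α),
      (∀ p ∈ xs ++ acc, ∀ q ∈ xs ++ acc, f p = f q → p = q) →
      List.foldl PySem.Set.add (acc.map f) (xs.map f) = (List.foldl PySem.Set.add acc xs).map f by
    simpa using h [] (by simpa using hinj)
  clear hinj
  induction xs with
  | nil => intro acc _; simp
  | cons x xs ih =>
    intro acc hinj
    simp only [List.map_cons, List.foldl_cons]
    have hadd : PySem.Set.add (acc.map f) (f x) = (PySem.Set.add acc x).map f := by
      simp only [PySem.Set.add]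
      by_cases hc : acc.contains x
      · have : (acc.map f).contains (f x) = true := by
          rw [List.contains_iff_mem] at hc ⊢
          exact List.mem_map_of_mem hc
        simp [this, List.contains_iff_mem.mp hc]
        exact ⟨x, List.contains_iff_mem.mp hc, rfl⟩
      · have : (acc.map f).contains (f x) = false := by
          rw [Bool.eq_false_iff]
          intro hmem
          rw [List.contains_iff_mem, List.mem_map] at hmem
          obtain ⟨p, hp, hfp⟩ := hmem
          have : p = x := hinj p (by simp [hp]) x (by simp) hfp
          rw [List.contains_iff_mem] at hc
          exact hc (this ▸ hp)
        have hxm : x ∉ acc := fun m => by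
          rw [List.contains_iff_mem.mpr m] at hc; exact absurd rfl hc
        simp [this, hxm]
        intro z hz hfz
        exact hxm (hinj z (by simp [hz]) x (by simp) hfz ▸ hz)
    rw [hadd]
    apply ih
    intro p hp q hq
    have hsub : ∀ z ∈ xs ++ PySem.Set.add acc x, z ∈ (x :: xs) ++ acc := by
      intro z hz
      rcases List.mem_append.mp hz with h1 | h1
      · simp [h1]
      · simp only [PySem.Set.add] at h1
        by_cases hc : PySem.Set.contains acc x = true
        · rw [if_pos hc] at h1; simp [h1]
        · rw [if_neg hc] at h1
          rcases List.mem_append.mp h1 with h2 | h2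
          · simp [h2]
          · simp at h2; simp [h2]
    exact hinj p (hsub p hp) q (hsub q hq)

theorem pv_count_map {α β : Type} [BEq α] [LawfulBEq α] [BEq β] [LawfulBEq β]
    (f : α → β) (xs : List α) (k : α) (hk : k ∈ xs)
    (hinj : ∀ p ∈ xs, ∀ q ∈ xs, f p = f q → p = q) :
    (xs.map f).count (f k) = xs.count k := by
  rw [List.count_eq_countP, List.count_eq_countP, List.countP_map]
  apply List.countP_congr
  intro x hx
  simp only [Function.comp_apply, beq_iff_eq]
  constructor
  · intro h; exact hinj x hx k hk h
  · intro h; rw [h]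

theorem pv_values_counter_map {α β : Type} [BEq α] [LawfulBEq α] [BEq β] [LawfulBEq β]
    (f : α → β) (xs : List α)
    (hinj : ∀ p ∈ xs, ∀ q ∈ xs, f p = f q → p = q) :
    (PySem.Dict.counter (xs.map f)).values = (PySem.Dict.counter xs).values := by
  have hv : ∀ (γ : Type) (d : PySem.Dict γ Int), d.values = d.items.map (fun p => p.2) := by
    intro γ d; rfl
  rw [hv, hv, PySem.Dict.items_counter, PySem.Dict.items_counter,
    List.map_map, List.map_map, pv_ofList_map f xs hinj, List.map_map]
  apply List.map_congr_left
  intro k hk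
  have hk' : k ∈ xs := (PySem.Set.mem_ofList xs k).mp hk
  simp only [Function.comp_apply]
  rw [show List.count (f k) (xs.map f) = (xs.map f).count (f k) from rfl,
    pv_count_map f xs k hk' hinj]

theorem pv_A_counter (solution_space : List (List String)) (solution : List String) :
    solution_space.foldl
      (fun (d : PySem.Dict (List String) Int) option =>
        let result := pvA_score solution option
        if !(d.keys.contains result) then d.insert result 1
        else d.insert result (d.getD result 0 + 1))
      PySem.Dict.empty
      = PySem.Dict.counter (solution_space.map (pvA_score solution)) := by
  rw [← PySem.Dict.foldl_insert_getD_add_one_eq_counter, List.foldl_map]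
  congr 1
  funext d option
  by_cases hc : d.keys.contains (pvA_score solution option) = true
  · simp only [hc, Bool.not_true, Bool.false_eq_true, if_false]
  · have hcd : d.contains (pvA_score solution option) = false := by
      rw [Bool.eq_false_iff]
      intro hct
      have := (PySem.Dict.contains_iff_mem_keys d _).mp hct
      exact hc (List.contains_iff_mem.mpr this)
    have hc' : d.keys.contains (pvA_score solution option) = false := Bool.eq_false_iff.mpr hc
    simp [hc', PySem.Dict.getD_of_not_contains d _ hcd]

theorem pv_final (solution_space : List (List String)) (solution : List String) :
    minimal_eliminated solution_space solution = minimal_eliminated_alt solution_space solution := by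
  unfold minimal_eliminated minimal_eliminated_alt
  have hmap : solution_space.map (pvA_score solution)
      = (solution_space.map (pvB_score_key solution (pvB_counts solution))).map pvEnc := by
    rw [List.map_map]
    exact List.map_congr_left (fun o _ => pv_score_eq_enc solution o)
  have hinj : ∀ p ∈ solution_space.map (pvB_score_key solution (pvB_counts solution)),
      ∀ q ∈ solution_space.map (pvB_score_key solution (pvB_counts solution)),
      pvEnc p = pvEnc q → p = q := by
    intro p hp q hq hpq
    rw [List.mem_map] at hp hq
    obtain ⟨o1, _, rfl⟩ := hp
    obtain ⟨o2, _, rfl⟩ := hq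
    rw [pv_key_eq solution o1, pv_key_eq solution o2] at hpq ⊢
    have h2 := pvEnc_inj _ _ _ _ hpq
    rw [h2.1, h2.2]
  have hval : (solution_space.foldl
      (fun (d : PySem.Dict (List String) Int) option =>
        let result := pvA_score solution option
        if !(d.keys.contains result) then d.insert result 1
        else d.insert result (d.getD result 0 + 1))
      PySem.Dict.empty).values
      = (pvB_counts (solution_space.map (pvB_score_key solution (pvB_counts solution)))).values := by
    rw [pv_A_counter, pvB_counts_eq_counter, hmap]
    exact pv_values_counter_map pvEnc _ hinj
  simp only [hval]

-- ===== VERDICT (by name: the statement is the Claim_ definition above) =====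
theorem minimal_eliminated_spec : Claim_equal_minimal_eliminated := by
  intro solution_space solution _ _
  unfold Spec_minimal_eliminated
  exact pv_final solution_space solution
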